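-- pv_equiv track=rewrite | github.com/FominaCathy/HomeWork_Python_general | HomeWork_03/Py_HomeWork_03_Task_ADD_02/Py_HomeWork_03_Task_ADD_02.py | function_delete
-- ===== SOURCE A (Python) =====
-- def function_delete(input_text, symbol_list: list):
--
--     split_text = input_text.split("\n")
--     len_split_text = len(split_text)
--     for i in range(0, len_split_text):
--         for s in symbol_list:
--             if split_text[i].find(s) != -1:
--                 split_text[i]  = split_text[i].replace(split_text[i][split_text[i].find(s):], "")
--
--     output_text = "\n".join(split_text)
--
--     return output_text
-- ===== SOURCE B (Python) =====
-- def _cutline(line, symbols):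
--     # track the cut position as an integer instead of repeatedly truncating the string
--     cut = len(line)
--     for s in symbols:
--         p = line.find(s, 0, cut)  # first occurrence lying wholly inside line[:cut]
--         if p != -1:
--             cut = p
--     return line[:cut]
--
--
-- def function_delete(input_text, symbol_list: list):
--     return "\n".join(_cutline(line, symbol_list) for line in input_text.split("\n"))
-- ===== Notes on version B (the rewrite author's own statement) =====
-- stated objective: alternative
-- what changed: B tracks each line's truncation point as an integer cut index updated with one bounded find (line.find(s, 0, cut)) per symbol and slices the line once, instead of A's per-symbol find/slice/replace that rebuilds the line string after every hit.
import Mathlib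
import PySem

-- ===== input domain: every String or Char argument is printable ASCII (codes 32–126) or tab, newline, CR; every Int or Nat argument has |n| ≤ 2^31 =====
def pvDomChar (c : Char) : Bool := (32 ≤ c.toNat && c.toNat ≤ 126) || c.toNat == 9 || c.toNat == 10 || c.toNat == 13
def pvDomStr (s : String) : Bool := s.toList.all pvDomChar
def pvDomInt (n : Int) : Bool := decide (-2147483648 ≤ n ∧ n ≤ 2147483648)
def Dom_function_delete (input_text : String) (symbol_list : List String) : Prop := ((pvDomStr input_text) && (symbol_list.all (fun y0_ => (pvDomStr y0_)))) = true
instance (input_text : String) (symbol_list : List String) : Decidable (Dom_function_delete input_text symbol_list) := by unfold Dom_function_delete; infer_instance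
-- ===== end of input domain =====

-- B tracks the truncation point of each line as an integer cut position (one bounded find per
-- symbol, one slice per line) instead of A's repeated find/slice/replace string surgery.

-- ===== PORT A =====
-- split("\n"); for each line, for each symbol: if found, replace the suffix from the first
-- occurrence by "" (find re-evaluated each time, exactly as A writes it); join with "\n".
-- 'for i in range(0, len): split_text[i] = f(split_text[i])' is the element-wise map of f.
def function_delete (input_text : String) (symbol_list : List String) : String :=
  let split_text := PySem.Chars.splitOn input_text.toList ['\n']
  String.ofList (PySem.Chars.join ['\n'] (split_text.map (fun line =>
    symbol_list.foldl (fun l s =>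
      if PySem.Chars.find l s.toList ≠ -1 then
        PySem.Chars.replace l (PySem.Chars.slice l (some (PySem.Chars.find l s.toList)) none) []
      else l) line)))

-- ===== PORT B =====
-- _cutline: line.find(s, 0, cut) is PySem.Chars.findFrom line s 0 (some cut) (exact, incl. clamping)
def pvCutline (line : List Char) (symbols : List String) : List Char :=
  PySem.Chars.slice line none (some (symbols.foldl (fun cut s =>
      let p := PySem.Chars.findFrom line s.toList 0 (some cut)
      if p ≠ -1 then p else cut) (line.length : Int)))

def function_delete_alt (input_text : String) (symbol_list : List String) : String :=
  String.ofList (PySem.Chars.join ['\n']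
    ((PySem.Chars.splitOn input_text.toList ['\n']).map (fun line => pvCutline line symbol_list)))

-- ===== PRECONDITION & SPEC =====
def Spec_function_delete (input_text : String) (symbol_list : List String) (out : String) : Prop := out = function_delete_alt input_text symbol_list
instance (input_text : String) (symbol_list : List String) (out : String) : Decidable (Spec_function_delete input_text symbol_list out) := by unfold Spec_function_delete; infer_instance

-- ===== CLAIM (what is proved, stated in full; the proofs are below) =====
def Claim_equal_function_delete : Prop := ∀ (input_text : String) (symbol_list : List String), Dom_function_delete input_text symbol_list → Spec_function_delete input_text symbol_list (function_delete input_text symbol_list)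

-- ===== LEMMAS AND PROOFS =====

-- replace.go on an empty subject returns the reversed accumulator
theorem pv_go_nil (old new : List Char) (fuel : Nat) (acc : List Char) :
    PySem.Chars.replace.go old new fuel [] acc = acc.reverse := by
  cases fuel <;> simp [PySem.Chars.replace.go]

-- go, replacing by [] the suffix of l that starts at its FIRST occurrence, truncates l there
theorem pv_go_take (old : List Char) :
    ∀ (fuel : Nat) (l : List Char) (p : Nat) (acc : List Char),
      old = l.drop p → p ≤ l.length → (∀ i < p, ¬ old <+: l.drop i) → l.length ≤ fuel →
      PySem.Chars.replace.go old [] fuel l acc = acc.reverse ++ l.take p := by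
  intro fuel
  induction fuel with
  | zero =>
    intro l p acc hold hp _ hfuel
    have : l = [] := List.eq_nil_of_length_eq_zero (Nat.le_zero.mp hfuel)
    subst this
    simp [PySem.Chars.replace.go]
  | succ n ih =>
    intro l p acc hold hp hmin hfuel
    cases l with
    | nil =>
      simp [pv_go_nil]
    | cons c t =>
      by_cases hpre : old.isPrefixOf (c :: t)
      · -- old is a prefix of l, so by minimality p = 0 and old = l
        have hp0 : p = 0 := by
          by_contra h
          exact hmin 0 (Nat.pos_of_ne_zero h) (by simpa using (List.isPrefixOf_iff_prefix.mp hpre))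
        subst hp0
        simp at hold
        rw [show PySem.Chars.replace.go old [] (n+1) (c :: t) acc
              = PySem.Chars.replace.go old [] n (List.drop old.length (c :: t)) ([].reverse ++ acc) by
            simp [PySem.Chars.replace.go, hpre]]
        rw [← hold]
        simp [pv_go_nil]
      · -- old is not a prefix here, so p > 0; step over c
        have hpne : p ≠ 0 := by
          intro h; subst h; simp at hold; subst hold
          exact hpre (List.isPrefixOf_iff_prefix.mpr (List.prefix_refl _))
        obtain ⟨q, rfl⟩ : ∃ q, p = q + 1 := ⟨p - 1, by omega⟩
        rw [show PySem.Chars.replace.go old [] (n+1) (c :: t) acc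
              = PySem.Chars.replace.go old [] n t (c :: acc) by
            simp [PySem.Chars.replace.go, hpre]]
        rw [ih t q (c :: acc) (by simpa using hold) (by simp at hp; omega)
              (fun i hi => by simpa using hmin (i+1) (by omega)) (by simp at hfuel; omega)]
        simp

-- find(s, 0, cut) with 0 ≤ cut ≤ len is find on the prefix take cut
theorem pv_findFrom_take (t sub : List Char) (c : Nat) (hc : c ≤ t.length) :
    PySem.Chars.findFrom t sub (0 : Int) (some (c : Int)) = PySem.Chars.find (t.take c) sub := by
  have h1 : ¬ ((t.length : Int) < (c : Int)) := by exact_mod_cast Nat.not_lt.mpr hc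
  have h2 : ¬ ((c : Int) < 0) := by omega
  simp [PySem.Chars.findFrom, h1, h2]
  intro h
  omega

-- one A-step on the prefix t.take c equals taking the new cut computed by one B-step
theorem pv_step (t : List Char) (s : List Char) (c : Nat) (hc : c ≤ t.length) :
    (if PySem.Chars.find (t.take c) s ≠ -1 then
        PySem.Chars.replace (t.take c)
          (PySem.Chars.slice (t.take c) (some (PySem.Chars.find (t.take c) s)) none) []
      else t.take c)
      = t.take (if PySem.Chars.find (t.take c) s ≠ -1 then (PySem.Chars.find (t.take c) s).toNat else c)
      ∧ (if PySem.Chars.find (t.take c) s ≠ -1 then (PySem.Chars.find (t.take c) s).toNat else c) ≤ c := by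
  by_cases h : PySem.Chars.find (t.take c) s = -1
  · constructor
    · simp [h]
    · simp [h]
  · have hnn : 0 ≤ PySem.Chars.find (t.take c) s := by
      have := PySem.Chars.neg_one_le_find (t.take c) s; omega
    have hple : (PySem.Chars.find (t.take c) s).toNat ≤ (t.take c).length := by
      have := PySem.Chars.find_le_length (t.take c) s; omega
    have hlen : (t.take c).length ≤ c := by simp
    obtain ⟨hsp, hminS⟩ := PySem.Chars.find_spec hnn
    constructor
    · rw [if_pos h, if_pos h]
      rw [PySem.Chars.slice_eq_listSlice, PySem.List.slice_from _ hnn]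
      have htake : (t.take c).take (PySem.Chars.find (t.take c) s).toNat
          = t.take (PySem.Chars.find (t.take c) s).toNat := by
        rw [List.take_take, Nat.min_eq_left (by simp at hple ⊢; omega)]
      by_cases hemp : (t.take c).drop (PySem.Chars.find (t.take c) s).toNat = []
      · -- suffix empty: replace l "" "" rebuilds l unchanged
        have hpl : (PySem.Chars.find (t.take c) s).toNat = (t.take c).length := by
          have h1 := List.length_drop (l := t.take c) (i := (PySem.Chars.find (t.take c) s).toNat)
          rw [hemp] at h1; simp at h1; omega
        have hrepl : PySem.Chars.replace (t.take c) [] [] = t.take c := by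
          simp [PySem.Chars.replace]
        have hpc : (PySem.Chars.find (t.take c) s).toNat = c := by
          simp at hpl; omega
        rw [hemp, hrepl, hpc]
      · -- suffix nonempty: replace.go truncates at the first occurrence
        rw [PySem.Chars.replace, if_neg (by simpa using hemp)]
        rw [pv_go_take _ _ _ _ [] rfl hple (fun i hi hpref => hminS i hi (hsp.trans hpref)) (le_refl _)]
        simpa using htake
    · rw [if_pos h]
      simp at hple hlen
      omega

-- the inner loops: A's repeated truncation of t.take c equals t.take (B's final cut); cut stays in [0, c]
theorem pv_inner (symbols : List String) :
    ∀ (t : List Char) (c : Nat), c ≤ t.length →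
      symbols.foldl (fun l s =>
          if PySem.Chars.find l s.toList ≠ -1 then
            PySem.Chars.replace l (PySem.Chars.slice l (some (PySem.Chars.find l s.toList)) none) []
          else l) (t.take c)
        = t.take (symbols.foldl (fun cut s =>
            let p := PySem.Chars.findFrom t s.toList 0 (some cut)
            if p ≠ -1 then p else cut) (c : Int)).toNat
      ∧ (0 : Int) ≤ (symbols.foldl (fun cut s =>
            let p := PySem.Chars.findFrom t s.toList 0 (some cut)
            if p ≠ -1 then p else cut) (c : Int))
      ∧ (symbols.foldl (fun cut s =>
            let p := PySem.Chars.findFrom t s.toList 0 (some cut)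
            if p ≠ -1 then p else cut) (c : Int)).toNat ≤ c := by
  induction symbols with
  | nil => intro t c hc; simp
  | cons s rest ih =>
    intro t c hc
    obtain ⟨hstep, hle⟩ := pv_step t s.toList c hc
    simp only [List.foldl_cons]
    rw [pv_findFrom_take t s.toList c hc]
    have hinit : (if PySem.Chars.find (t.take c) s.toList ≠ -1
          then PySem.Chars.find (t.take c) s.toList else (c : Int))
        = ((if PySem.Chars.find (t.take c) s.toList ≠ -1
            then (PySem.Chars.find (t.take c) s.toList).toNat else c : Nat) : Int) := by
      by_cases h : PySem.Chars.find (t.take c) s.toList = -1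
      · simp [h]
      · have hnn : 0 ≤ PySem.Chars.find (t.take c) s.toList := by
          have := PySem.Chars.neg_one_le_find (t.take c) s.toList; omega
        simp [h, Int.toNat_of_nonneg hnn]
    rw [hinit, hstep]
    obtain ⟨ihA, ihNN, ihLE⟩ := ih t
      (if PySem.Chars.find (t.take c) s.toList ≠ -1
        then (PySem.Chars.find (t.take c) s.toList).toNat else c) (le_trans hle hc)
    exact ⟨ihA, ihNN, le_trans ihLE hle⟩

-- each line: the whole inner A loop equals B's _cutline
theorem pv_line (line : List Char) (symbol_list : List String) :
    symbol_list.foldl (fun l s =>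
        if PySem.Chars.find l s.toList ≠ -1 then
          PySem.Chars.replace l (PySem.Chars.slice l (some (PySem.Chars.find l s.toList)) none) []
        else l) line
      = pvCutline line symbol_list := by
  obtain ⟨hA, hNN, _⟩ := pv_inner symbol_list line line.length (le_refl _)
  rw [List.take_length] at hA
  unfold pvCutline
  rw [PySem.Chars.slice_eq_listSlice, PySem.List.slice_to _ hNN]
  exact hA

-- ===== VERDICT (by name: the statement is the Claim_ definition above) =====
theorem function_delete_spec : Claim_equal_function_delete := by
  intro input_text symbol_list _
  unfold Spec_function_delete function_delete function_delete_alt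
  simp only []
  congr 1
  congr 1
  exact List.map_congr_left (fun line _ => pv_line line symbol_list)
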